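-- pv_equiv track=rewrite | github.com/jakubborowiecki/Algorytmy_Struktury_Danych | Programowanie dynamiczne.py | odtwarzanie_sciezki
-- ===== SOURCE A (Python) =====
-- def odtwarzanie_sciezki(P, T, parent):
--     i = len(P)
--     j = len(T)
--     sciezka = []
--
--     while i > 0 or j > 0:
--         if i == 0:
--             sciezka.append('I')
--             j -= 1
--         elif j == 0:
--             sciezka.append('D')
--             i -= 1
--         else:
--             operacja = parent[i][j]
--             if operacja in ['M', 'S']:
--                 sciezka.append(operacja)
--                 i -= 1
--                 j -= 1
--             elif operacja == 'I':
--                 sciezka.append(operacja)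
--                 j -= 1
--             elif operacja == 'D':
--                 sciezka.append(operacja)
--                 i -= 1
--
--     return ''.join(sciezka[::-1])
-- ===== SOURCE B (Python) =====
-- def odtwarzanie_sciezki(P, T, parent):
--     # Recursive decomposition: rec(i, j) returns the operation path leading
--     # from (0, 0) to state (i, j) directly in FORWARD order (the call stack
--     # does the ordering), so A's collected list, its reversal and the join
--     # all disappear.
--     def rec(i, j):
--         if i == 0 and j == 0:
--             return ''
--         if i == 0:
--             return rec(0, j - 1) + 'I'
--         if j == 0:
--             return rec(i - 1, 0) + 'D'
--         op = parent[i][j]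
--         if op in ('M', 'S'):
--             return rec(i - 1, j - 1) + op
--         if op == 'I':
--             return rec(i, j - 1) + op
--         if op == 'D':
--             return rec(i - 1, j) + op
--         raise ValueError('unrecognized parent operation: %r' % (op,))
--     return rec(len(P), len(T))
-- ===== Notes on version B (the rewrite author's own statement) =====
-- stated objective: alternative
-- what changed: B replaces A's iterative backtracking loop (collect ops into a list, reverse, join) by a recursive function rec(i, j) that returns the path to state (i, j) already in forward order, so the accumulator list, the reversal and the join disappear; on an unrecognized parent entry B raises ValueError where A loops forever (outside Pre_).
-- outside the precondition, e.g. on odtwarzanie_sciezki('ab', 'ab', [['x', 'x', 'x'], ['x', 'M', 'x'], ['x', 'x', 'M']]): A returns 'MM', B returns 'MM'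
import Mathlib
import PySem

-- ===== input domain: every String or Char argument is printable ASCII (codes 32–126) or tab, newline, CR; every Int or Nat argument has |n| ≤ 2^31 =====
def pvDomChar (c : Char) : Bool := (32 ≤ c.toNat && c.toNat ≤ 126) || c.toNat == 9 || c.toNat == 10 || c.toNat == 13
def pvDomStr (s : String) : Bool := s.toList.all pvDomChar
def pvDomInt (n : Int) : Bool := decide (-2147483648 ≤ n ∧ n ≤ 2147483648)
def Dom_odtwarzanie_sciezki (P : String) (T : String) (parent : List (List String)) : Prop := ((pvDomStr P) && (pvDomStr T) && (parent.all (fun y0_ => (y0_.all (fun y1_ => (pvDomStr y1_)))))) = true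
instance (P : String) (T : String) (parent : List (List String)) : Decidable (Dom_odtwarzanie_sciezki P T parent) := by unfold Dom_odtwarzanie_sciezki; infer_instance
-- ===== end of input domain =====

-- B rebuilds the edit path with a recursive helper rec(i, j) returning the path to state
-- (i, j) already in forward order, so A's accumulator list, reversal and join disappear;
-- return values agree on all of Pre_.

-- ===== PORT A =====
-- A's while-loop as fuel recursion. Inside Pre_ every iteration decreases i + j, so the
-- fuel i + j given below never runs out before the loop condition fails; the fuel-0 and
-- unrecognized-operation fallthroughs (where Python A loops forever) lie outside Pre_.
-- parent[i][j]: i, j ≥ 1 in that branch, so PySem.List.pyGet? with a Nat cast is Python's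
-- indexing; none = IndexError, excluded by Pre_ (the .getD default is never reached there).
def pvLoopA (parent : List (List String)) : Nat → Nat → Nat → List String → List String
  | 0, _, _, sciezka => sciezka
  | fuel+1, i, j, sciezka =>
    if i = 0 ∧ j = 0 then sciezka
    else if i = 0 then pvLoopA parent fuel i (j - 1) (sciezka ++ ["I"])
    else if j = 0 then pvLoopA parent fuel (i - 1) j (sciezka ++ ["D"])
    else
      let operacja := (PySem.List.pyGet? ((PySem.List.pyGet? parent (i : Int)).getD []) (j : Int)).getD ""
      if operacja = "M" ∨ operacja = "S" then pvLoopA parent fuel (i - 1) (j - 1) (sciezka ++ [operacja])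
      else if operacja = "I" then pvLoopA parent fuel i (j - 1) (sciezka ++ [operacja])
      else if operacja = "D" then pvLoopA parent fuel (i - 1) j (sciezka ++ [operacja])
      else pvLoopA parent fuel i j sciezka

-- ''.join(sciezka[::-1]) via PySem.Str.join and PySem.List.slice? (s[::-1]; never none for step -1)
def odtwarzanie_sciezki (P : String) (T : String) (parent : List (List String)) : String :=
  let i := P.toList.length
  let j := T.toList.length
  PySem.Str.join "" ((PySem.List.slice? (pvLoopA parent (i + j) i j []) none none (-1)).getD [])

-- ===== PORT B =====
-- Source B's rec(i, j): returns the forward path to state (i, j); each call appends its own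
-- operation after the recursively built prefix ('rec(…) + op').
-- The branch where Source B raises ValueError (unrecognized op) is outside Pre_.
def pvRecB (parent : List (List String)) : Nat → Nat → List Char
  | 0, 0 => []
  | 0, j+1 => pvRecB parent 0 j ++ ['I']
  | i+1, 0 => pvRecB parent i 0 ++ ['D']
  | i+1, j+1 =>
    let op := (PySem.List.pyGet? ((PySem.List.pyGet? parent ((i+1 : Nat) : Int)).getD []) ((j+1 : Nat) : Int)).getD ""
    if op = "M" ∨ op = "S" then pvRecB parent i j ++ op.toList
    else if op = "I" then pvRecB parent (i+1) j ++ ['I']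
    else if op = "D" then pvRecB parent i (j+1) ++ ['D']
    else []
  termination_by i j => i + j

def odtwarzanie_sciezki_alt (P : String) (T : String) (parent : List (List String)) : String :=
  String.ofList (pvRecB parent P.toList.length T.toList.length)

-- ===== PRECONDITION & SPEC =====
-- Pre_ excludes tables that are ragged or hold an entry outside {'M','S','I','D'} somewhere in
-- the rectangle rows 1..len(P) × columns 1..len(T): on garbage a walk actually reaches, A loops
-- forever or raises IndexError (and B raises ValueError/IndexError); garbage only on cells the
-- walk skips cannot be separated from that without re-running the walk, so the whole rectangle
-- is required (a slight narrowing; A and B still agree there — see the cite in the claim).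
def Pre_odtwarzanie_sciezki (P : String) (T : String) (parent : List (List String)) : Prop :=
  P.toList.length = 0 ∨ T.toList.length = 0 ∨
    (P.toList.length + 1 ≤ parent.length ∧
      ∀ row ∈ (parent.drop 1).take P.toList.length,
        T.toList.length + 1 ≤ row.length ∧
          ∀ op ∈ (row.drop 1).take T.toList.length,
            op = "M" ∨ op = "S" ∨ op = "I" ∨ op = "D")
instance (P : String) (T : String) (parent : List (List String)) : Decidable (Pre_odtwarzanie_sciezki P T parent) := by unfold Pre_odtwarzanie_sciezki; infer_instance

def pvWitness_odtwarzanie_sciezki : String × String × List (List String) :=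
  ("a", "b", [["x", "x"], ["x", "S"]])

def Spec_odtwarzanie_sciezki (P : String) (T : String) (parent : List (List String)) (out : String) : Prop := out = odtwarzanie_sciezki_alt P T parent
instance (P : String) (T : String) (parent : List (List String)) (out : String) : Decidable (Spec_odtwarzanie_sciezki P T parent out) := by unfold Spec_odtwarzanie_sciezki; infer_instance

-- ===== CLAIM (what is proved, stated in full; the proofs are below) =====
def Claim_equal_odtwarzanie_sciezki : Prop := ∀ (P : String) (T : String) (parent : List (List String)), Dom_odtwarzanie_sciezki P T parent → Pre_odtwarzanie_sciezki P T parent → Spec_odtwarzanie_sciezki P T parent (odtwarzanie_sciezki P T parent)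

-- ===== LEMMAS AND PROOFS =====

-- the cell both programs read at a state (a, b) with a, b ≥ 1, after pyGet?_natCast
def pvCell (parent : List (List String)) (a b : Nat) : String :=
  ((parent[a]?.getD [])[b]?.getD "")

lemma pvCell_eq (parent : List (List String)) (a b : Nat) :
    (PySem.List.pyGet? ((PySem.List.pyGet? parent (a : Int)).getD []) (b : Int)).getD "" = pvCell parent a b := by
  simp [pvCell]

-- Pre_ gives a recognized operation at every cell of the rectangle
lemma pre_valid (P T : String) (parent : List (List String))
    (h : Pre_odtwarzanie_sciezki P T parent) :
    ∀ a b, 0 < a → a ≤ P.toList.length → 0 < b → b ≤ T.toList.length →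
      pvCell parent a b = "M" ∨ pvCell parent a b = "S" ∨
      pvCell parent a b = "I" ∨ pvCell parent a b = "D" := by
  intro a b ha ham hb hbn
  rcases h with h | h | ⟨hlen, hrows⟩
  · omega
  · omega
  · have halt : a < parent.length := by omega
    have hrowmem : parent[a] ∈ (parent.drop 1).take P.toList.length := by
      apply List.mem_of_getElem? (i := a - 1)
      rw [List.getElem?_take, if_pos (by omega), List.getElem?_drop]
      have : 1 + (a - 1) = a := by omega
      rw [this, List.getElem?_eq_getElem halt]
    obtain ⟨hrlen, hops⟩ := hrows _ hrowmem
    have hblt : b < parent[a].length := by omega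
    have hopmem : parent[a][b] ∈ ((parent[a].drop 1).take T.toList.length) := by
      apply List.mem_of_getElem? (i := b - 1)
      rw [List.getElem?_take, if_pos (by omega), List.getElem?_drop]
      have : 1 + (b - 1) = b := by omega
      rw [this, List.getElem?_eq_getElem hblt]
    have := hops _ hopmem
    simpa [pvCell, List.getElem?_eq_getElem, halt, hblt] using this

-- A's loop only ever extends the accumulator on the right
lemma pvLoopA_acc (parent : List (List String)) :
    ∀ fuel i j acc, pvLoopA parent fuel i j acc = acc ++ pvLoopA parent fuel i j [] := by
  intro fuel
  induction fuel with
  | zero => intro i j acc; simp [pvLoopA]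
  | succ fuel ih =>
    intro i j acc
    simp only [pvLoopA]
    split_ifs with h1 h2 h3 h4 h5 h6
    · simp
    · rw [ih _ _ (acc ++ ["I"]), ih _ _ ([] ++ ["I"])]; simp
    · rw [ih _ _ (acc ++ ["D"]), ih _ _ ([] ++ ["D"])]; simp
    · rw [ih _ _ (acc ++ [_]), ih _ _ ([] ++ [_])]; simp
    · rw [ih _ _ (acc ++ [_]), ih _ _ ([] ++ [_])]; simp
    · rw [ih _ _ (acc ++ [_]), ih _ _ ([] ++ [_])]; simp
    · exact ih i j acc

-- the two walks produce the same characters: A's pieces, reversed and concatenated,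
-- are exactly B's recursively built forward path
lemma pvWalk_eq (P T : String) (parent : List (List String))
    (hval : ∀ a b, 0 < a → a ≤ P.toList.length → 0 < b → b ≤ T.toList.length →
      pvCell parent a b = "M" ∨ pvCell parent a b = "S" ∨
      pvCell parent a b = "I" ∨ pvCell parent a b = "D") :
    ∀ fuel i j, i ≤ P.toList.length → j ≤ T.toList.length → i + j ≤ fuel →
      ((pvLoopA parent fuel i j []).reverse.map String.toList).flatten = pvRecB parent i j := by
  intro fuel
  induction fuel with
  | zero =>
    intro i j hi hj hf
    have h0 : i = 0 := by omega
    have h0' : j = 0 := by omega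
    subst h0; subst h0'
    simp [pvLoopA, pvRecB]
  | succ fuel ih =>
    intro i j hi hj hf
    match i, j with
    | 0, 0 => simp [pvLoopA, pvRecB]
    | 0, j+1 =>
      simp only [pvLoopA, pvRecB]
      norm_num
      rw [pvLoopA_acc]
      rw [← ih 0 j (by omega) (by omega) (by omega)]
      simp
    | i+1, 0 =>
      simp only [pvLoopA, pvRecB]
      norm_num
      rw [pvLoopA_acc]
      rw [← ih i 0 (by omega) (by omega) (by omega)]
      simp
    | i+1, j+1 =>
      have hcell := hval (i+1) (j+1) (by omega) (by omega) (by omega) (by omega)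
      simp only [pvLoopA, pvRecB, pvCell_eq]
      norm_num
      rcases hcell with hc | hc | hc | hc <;> rw [hc] <;> norm_num
      · rw [pvLoopA_acc parent fuel i j]
        rw [← ih i j (by omega) (by omega) (by omega)]
        simp
      · rw [pvLoopA_acc parent fuel i j]
        rw [← ih i j (by omega) (by omega) (by omega)]
        simp
      · rw [pvLoopA_acc parent fuel (i+1) j]
        rw [← ih (i+1) j (by omega) (by omega) (by omega)]
        simp
      · rw [pvLoopA_acc parent fuel i (j+1)]
        rw [← ih i (j+1) (by omega) (by omega) (by omega)]
        simp

-- ''.join of a list of strings is the concatenation of their characters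
lemma join_empty_flatten (L : List (List Char)) : PySem.Chars.join [] L = L.flatten := by
  induction L with
  | nil => rfl
  | cons a t ih =>
    cases t with
    | nil => simp [PySem.Chars.join_singleton]
    | cons b u => rw [PySem.Chars.join_cons_cons, ih]; simp

-- ===== VERDICT (by name: the statement is the Claim_ definition above) =====
theorem odtwarzanie_sciezki_spec : Claim_equal_odtwarzanie_sciezki := by
  intro P T parent _hdom hpre
  unfold Spec_odtwarzanie_sciezki odtwarzanie_sciezki odtwarzanie_sciezki_alt
  dsimp only
  rw [PySem.List.slice?_none_none_neg_one]
  apply String.toList_inj.mp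
  rw [PySem.Str.toList_join]
  simp only [Option.getD_some, String.toList_ofList]
  rw [show ("" : String).toList = [] from rfl, join_empty_flatten]
  exact pvWalk_eq P T parent (pre_valid P T parent hpre)
    (P.toList.length + T.toList.length) P.toList.length T.toList.length
    (le_refl _) (le_refl _) (le_refl _)
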